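-- pv_equiv track=rewrite | github.com/All-Hands-AI/OpenHands | evaluation/logic_reasoning/run_infer.py | get_test_result
-- ===== SOURCE A (Python) =====
-- def get_choice(answer_str):
--     choices = [
--         'A',
--         'B',
--         'C',
--         'D',
--         'E',
--         'F',
--         'G',
--         'H',
--         'A)',
--         'B)',
--         'C)',
--         'D)',
--         'E)',
--         'F)',
--         'G)',
--         'H)',
--         'A.',
--         'B.',
--         'C.',
--         'D.',
--         'E.',
--         'F.',
--         'G.',
--         'H.',
--     ]
--     for c in choices:
--         if answer_str.startswith(c):
--             return c.replace(')', '')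
--
--     if answer_str.startswith(':'):
--         return answer_str.replace(':', '').replace('.', '').strip()
--     return None
--
-- def get_test_result(
--     model_answer: str,
--     ground_truth: str,
-- ) -> bool:
--     gold_answer = ground_truth.replace('(', '').replace(')', '').strip()
--     answer_str = model_answer if model_answer is not None else ''
--     prediction = get_choice(answer_str)
--
--     indicators = [
--         'the correct option is',
--         'the correct answer is',
--         'The correct answer is',
--         'The correct option is',
--         'Thus, the answer is',
--     ]
--     if prediction is None:
--         for indicator in indicators:
--             if answer_str.find(indicator) >= 0:
--                 answer_str = answer_str.split(indicator)[1].strip()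
--                 prediction = get_choice(answer_str)
--                 break
--
--     isTrue = prediction == gold_answer
--     test_result = {'result': isTrue}
--     return test_result
-- ===== SOURCE B (Python) =====
-- INDICATORS = [
--     'the correct option is',
--     'the correct answer is',
--     'The correct answer is',
--     'The correct option is',
--     'Thus, the answer is',
-- ]
--
--
-- def get_choice(answer_str):
--     # single-letter fast path: the 24-entry table of A always matches on the
--     # first character alone, so a direct membership test suffices
--     if answer_str and answer_str[0] in 'ABCDEFGH':
--         return answer_str[0]
--     if answer_str.startswith(':'):
--         return answer_str.replace(':', '').replace('.', '').strip()
--     return None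
--
--
-- def get_test_result(model_answer, ground_truth):
--     gold = ground_truth.replace('(', '').replace(')', '').strip()
--     answer_str = model_answer if model_answer is not None else ''
--     prediction = get_choice(answer_str)
--     if prediction is None:
--         hit = next((i for i in INDICATORS if i in answer_str), None)
--         if hit is not None:
--             prediction = get_choice(answer_str.split(hit)[1].strip())
--     return {'result': prediction == gold}
-- ===== Notes on version B (the rewrite author's own statement) =====
-- stated objective: simpler
-- what changed: get_choice's 24-element choices table and linear scan are replaced by a direct first-character membership test (the single-letter entries always shadow the ')'/'.' variants), and the indicator break-loop is replaced by a next()-over-generator lookup using substring membership.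
import Mathlib
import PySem

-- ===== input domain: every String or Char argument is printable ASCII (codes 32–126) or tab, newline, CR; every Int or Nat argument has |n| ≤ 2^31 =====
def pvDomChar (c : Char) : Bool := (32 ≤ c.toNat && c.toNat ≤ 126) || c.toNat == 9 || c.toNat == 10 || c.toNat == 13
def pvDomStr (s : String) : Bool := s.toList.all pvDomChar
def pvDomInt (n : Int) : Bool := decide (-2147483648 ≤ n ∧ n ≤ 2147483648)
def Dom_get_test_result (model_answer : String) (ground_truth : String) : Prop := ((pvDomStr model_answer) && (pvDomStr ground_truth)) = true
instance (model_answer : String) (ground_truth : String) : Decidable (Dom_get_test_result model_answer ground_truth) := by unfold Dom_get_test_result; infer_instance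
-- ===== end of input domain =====

-- B replaces get_choice's 24-entry table scan by a direct first-character membership
-- test and the indicator break-loop by a first-match lookup (objective: simpler).

-- ===== PORT A =====
def pvChoicesA : List String :=
  ["A", "B", "C", "D", "E", "F", "G", "H",
   "A)", "B)", "C)", "D)", "E)", "F)", "G)", "H)",
   "A.", "B.", "C.", "D.", "E.", "F.", "G.", "H."]

def pvChoiceLoopA (s : String) : List String → Option String
  | [] => none
  | c :: rest =>
    if PySem.Str.startswith s c then some (PySem.Str.replace c ")" "")
    else pvChoiceLoopA s rest

def get_choice_A (s : String) : Option String :=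
  match pvChoiceLoopA s pvChoicesA with
  | some r => some r
  | none =>
    if PySem.Str.startswith s ":" then
      some (PySem.Str.strip (PySem.Str.replace (PySem.Str.replace s ":" "") "." ""))
    else none

def pvIndicators : List String :=
  ["the correct option is", "the correct answer is", "The correct answer is",
   "The correct option is", "Thus, the answer is"]

-- A's for-loop with break: first indicator found in answer_str gives the re-split text
def pvIndLoopA (s : String) : List String → Option String
  | [] => none
  | ind :: rest =>
    if 0 ≤ PySem.Str.find s ind then
      some (PySem.Str.strip (((PySem.Str.split? s ind).getD []).getD 1 ""))
    else pvIndLoopA s rest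

def get_test_result (model_answer : String) (ground_truth : String) : List (String × Bool) :=
  let gold := PySem.Str.strip (PySem.Str.replace (PySem.Str.replace ground_truth "(" "") ")" "")
  let answer_str := model_answer
  let prediction := get_choice_A answer_str
  let prediction :=
    match prediction with
    | some p => some p
    | none =>
      match pvIndLoopA answer_str pvIndicators with
      | some t => get_choice_A t
      | none => none
  [("result", decide (prediction = some gold))]

-- ===== PORT B =====

def get_choice_B (s : String) : Option String :=
  match s.toList with
  | c :: _ =>
    if PySem.Str.isIn (String.ofList [c]) "ABCDEFGH" then some (String.ofList [c])
    else if PySem.Str.startswith s ":" then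
      some (PySem.Str.strip (PySem.Str.replace (PySem.Str.replace s ":" "") "." ""))
    else none
  | [] =>
    if PySem.Str.startswith s ":" then
      some (PySem.Str.strip (PySem.Str.replace (PySem.Str.replace s ":" "") "." ""))
    else none

def get_test_result_alt (model_answer : String) (ground_truth : String) : List (String × Bool) :=
  let gold := PySem.Str.strip (PySem.Str.replace (PySem.Str.replace ground_truth "(" "") ")" "")
  let answer_str := model_answer
  let prediction := get_choice_B answer_str
  let prediction :=
    match prediction with
    | some p => some p
    | none =>
      match pvIndicators.find? (fun i => PySem.Str.isIn i answer_str) with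
      | some i => get_choice_B (PySem.Str.strip (((PySem.Str.split? answer_str i).getD []).getD 1 ""))
      | none => none
  [("result", decide (prediction = some gold))]

-- ===== PRECONDITION & SPEC =====
def Spec_get_test_result (model_answer : String) (ground_truth : String) (out : List (String × Bool)) : Prop := out = get_test_result_alt model_answer ground_truth
instance (model_answer : String) (ground_truth : String) (out : List (String × Bool)) : Decidable (Spec_get_test_result model_answer ground_truth out) := by unfold Spec_get_test_result; infer_instance

-- ===== CLAIM (what is proved, stated in full; the proofs are below) =====
def Claim_equal_get_test_result : Prop := ∀ (model_answer : String) (ground_truth : String), Dom_get_test_result model_answer ground_truth → Spec_get_test_result model_answer ground_truth (get_test_result model_answer ground_truth)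

-- ===== LEMMAS AND PROOFS =====

theorem pv_singleton_infix_iff (c : Char) (l : List Char) : [c] <:+: l ↔ c ∈ l := by
  constructor
  · rintro ⟨u, v, h⟩
    subst h; simp
  · intro hc
    obtain ⟨u, v, rfl⟩ := List.mem_iff_append.mp hc
    exact ⟨u, v, by simp⟩

theorem choice_eq (s : String) : get_choice_A s = get_choice_B s := by
  unfold get_choice_A get_choice_B
  cases hs : s.toList with
  | nil =>
    simp [pvChoiceLoopA, pvChoicesA, PySem.Chars.startswith, hs]
  | cons c rest =>
    by_cases hc : c = 'A' ∨ c = 'B' ∨ c = 'C' ∨ c = 'D' ∨ c = 'E' ∨ c = 'F' ∨ c = 'G' ∨ c = 'H'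
    · have habc : ("ABCDEFGH" : String).toList = ['A','B','C','D','E','F','G','H'] := rfl
      rcases hc with rfl | rfl | rfl | rfl | rfl | rfl | rfl | rfl <;>
        simp [pvChoiceLoopA, pvChoicesA, PySem.Chars.startswith, hs, List.isPrefixOf, habc] <;> decide
    · push_neg at hc
      obtain ⟨h1, h2, h3, h4, h5, h6, h7, h8⟩ := hc
      have hIn : PySem.Chars.isIn [c] ['A','B','C','D','E','F','G','H'] = false := by
        rw [PySem.Chars.isIn_eq_false_iff]
        intro hinf
        have hm := (pv_singleton_infix_iff c _).mp hinf
        simp at hm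
        tauto
      simp [pvChoiceLoopA, pvChoicesA, PySem.Chars.startswith, hs, List.isPrefixOf,
            Ne.symm h1, Ne.symm h2, Ne.symm h3, Ne.symm h4, Ne.symm h5, Ne.symm h6,
            Ne.symm h7, Ne.symm h8, hIn]

theorem indLoop_eq (s : String) (l : List String) :
    pvIndLoopA s l =
      (l.find? (fun i => PySem.Str.isIn i s)).map
        (fun i => PySem.Str.strip (((PySem.Str.split? s i).getD []).getD 1 "")) := by
  induction l with
  | nil => rfl
  | cons ind rest ih =>
    by_cases h : PySem.Str.isIn ind s = true
    · have hf : 0 ≤ PySem.Str.find s ind := by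
        rw [PySem.Str.find_nonneg_iff s ind]
        exact (PySem.Str.isIn_iff_infix ind s).mp h
      rw [pvIndLoopA, if_pos hf]
      have h' : PySem.Chars.isIn ind.toList s.toList = true := by simpa using h
      simp [List.find?, h']
    · have hf : ¬ 0 ≤ PySem.Str.find s ind := by
        rw [PySem.Str.find_nonneg_iff s ind]
        intro hin
        exact h ((PySem.Str.isIn_iff_infix ind s).mpr hin)
      rw [pvIndLoopA, if_neg hf, ih]
      have h' : PySem.Chars.isIn ind.toList s.toList = false := by simpa using h
      simp [List.find?, h']

-- ===== VERDICT (by name: the statement is the Claim_ definition above) =====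
theorem get_test_result_spec : Claim_equal_get_test_result := by
  intro ma gt _
  unfold Spec_get_test_result get_test_result get_test_result_alt
  simp only [choice_eq, indLoop_eq]
  cases List.find? (fun i => PySem.Str.isIn i ma) pvIndicators <;> rfl
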